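-- pv_equiv track=rewrite | github.com/codersx-philip-nguyen/SS01 | pratices/mock_test/main.py | similarity_calculate
-- ===== SOURCE A (Python) =====
-- def dotproduct(K,L):
--     if len(K)==len(L) and len(K)!=0:
--         return sum([K[n]*L[n] for n in range(len(K))])
--     else:
--         return 0
--
-- def similarity_calculate(given_user, user_rating_dict):
--     #initial calculatio_dict
--     calculation_dict = {}
--     for username in user_rating_dict:
--         calculation_dict[username] = 0
--
--     for username in user_rating_dict:
--         calculation_dict[username] = dotproduct(user_rating_dict[given_user], user_rating_dict[username])
--
--     slice_index = len(user_rating_dict)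
--     if len(user_rating_dict) > 4:
--         slice_index = 4
--     calculation_list = list(sorted(calculation_dict.items(), key=lambda item: item[1], reverse=True))[:slice_index]
--
--
--     calculate_dict = {}
--     for e in calculation_list:
--         if e[0] == given_user:
--             continue
--         calculate_dict[e[0]] = user_rating_dict[e[0]]
--     return calculate_dict
-- ===== SOURCE B (Python) =====
-- def similarity_calculate(given_user, user_rating_dict):
--     base = user_rating_dict[given_user]
--     k = min(len(user_rating_dict), 4)
--     # one pass: keep the top-k (user, score) pairs, score descending, stable
--     top = []
--     for user, ratings in user_rating_dict.items():
--         if len(ratings) == len(base) and base: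
--             score = sum(x * y for x, y in zip(base, ratings))
--         else:
--             score = 0
--         i = 0
--         while i < len(top) and top[i][1] >= score:
--             i += 1
--         if i < k:
--             top.insert(i, (user, score))
--             del top[k:]
--     return {user: user_rating_dict[user] for user, _ in top if user != given_user}
-- ===== Notes on version B (the rewrite author's own statement) =====
-- stated objective: alternative
-- what changed: B drops A's zero-initialization pass and full sort-then-slice: it scores each user once while maintaining a bounded (size <= min(len,4)) insertion list of the top pairs, then builds the result from that list.
-- outside the precondition, e.g. on similarity_calculate('', {}): A returns {}, B raises KeyError
import Mathlib
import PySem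

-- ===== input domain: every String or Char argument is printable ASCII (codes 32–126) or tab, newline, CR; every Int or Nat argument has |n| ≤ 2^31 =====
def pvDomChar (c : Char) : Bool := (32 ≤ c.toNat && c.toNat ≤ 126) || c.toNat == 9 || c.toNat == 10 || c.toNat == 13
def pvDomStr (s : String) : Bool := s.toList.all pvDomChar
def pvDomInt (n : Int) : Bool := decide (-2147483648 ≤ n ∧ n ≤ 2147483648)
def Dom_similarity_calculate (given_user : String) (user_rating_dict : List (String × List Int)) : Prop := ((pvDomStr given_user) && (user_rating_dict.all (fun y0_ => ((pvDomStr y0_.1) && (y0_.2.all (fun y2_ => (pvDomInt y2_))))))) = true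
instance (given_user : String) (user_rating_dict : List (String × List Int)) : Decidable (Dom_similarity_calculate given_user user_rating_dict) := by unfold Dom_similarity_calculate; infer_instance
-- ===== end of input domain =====

-- B replaces A's zero-init pass, full sort and slice by a single bounded-insertion pass keeping only the
-- top-min(len,4) scored pairs (objective: alternative / partial selection instead of a full sort).

-- ===== PORT A =====
def dotproduct (K L : List Int) : Int :=
  if K.length = L.length ∧ K.length ≠ 0 then
    -- K[n], L[n] for n in range(len(K)): indices are in range, so getD-with-0 is exact here
    ((PySem.List.pyRange 0 (K.length : Int) 1).map
      (fun n => PySem.List.pyGetD K n 0 * PySem.List.pyGetD L n 0)).sum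
  else 0

def similarity_calculate (given_user : String) (user_rating_dict : List (String × List Int)) : List (String × List Int) :=
  let d : PySem.Dict String (List Int) := PySem.Dict.mk user_rating_dict
  -- 'for username in user_rating_dict' iterates the dict's keys
  let calculation_dict : PySem.Dict String Int :=
    d.keys.foldl (fun c u => c.insert u 0) PySem.Dict.empty
  -- user_rating_dict[given_user] raises KeyError when absent: excluded by Pre_, so getD is exact
  let calculation_dict2 : PySem.Dict String Int :=
    d.keys.foldl (fun c u => c.insert u (dotproduct (d.getD given_user []) (d.getD u []))) calculation_dict
  let slice_index : Int := if (d.size : Int) > 4 then 4 else (d.size : Int)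
  let calculation_list :=
    PySem.List.slice (PySem.List.sorted calculation_dict2.items (fun p => p.2) true) none (some slice_index)
  let calculate_dict : PySem.Dict String (List Int) :=
    calculation_list.foldl
      (fun c e => if e.1 == given_user then c else c.insert e.1 (d.getD e.1 [])) PySem.Dict.empty
  calculate_dict.items

-- ===== PORT B =====
-- sum(x * y for x, y in zip(base, v))
def pyDotZip (base v : List Int) : Int := ((base.zip v).map (fun q => q.1 * q.2)).sum

-- 'i = 0; while i < len(top) and top[i][1] >= score: i += 1'
def bFindIdx (score : Int) : List (String × Int) → Nat
  | [] => 0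
  | y :: ys => if y.2 ≥ score then bFindIdx score ys + 1 else 0

def similarity_calculate_alt (given_user : String) (user_rating_dict : List (String × List Int)) : List (String × List Int) :=
  let d : PySem.Dict String (List Int) := PySem.Dict.mk user_rating_dict
  let base := d.getD given_user []   -- user_rating_dict[given_user]; KeyError excluded by Pre_
  let k := min d.size 4
  let top : List (String × Int) :=
    d.items.foldl (fun top p =>
      let score := if p.2.length = base.length ∧ base ≠ [] then pyDotZip base p.2 else 0
      let i := bFindIdx score top
      if i < k then (PySem.List.insert top (i : Int) (p.1, score)).take k   -- top.insert(i, …); del top[k:]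
      else top) []
  (top.foldl (fun c p => if p.1 == given_user then c else c.insert p.1 (d.getD p.1 [])) PySem.Dict.empty).items

-- ===== PRECONDITION & SPEC =====
-- Nodup excludes duplicate-key association lists, which do not denote any Python dict (which binding wins is a
-- representation accident); membership of given_user excludes the inputs where A raises KeyError — including the
-- empty dict, where A's loops never reach the given_user lookup and it returns {}, while B performs the lookup
-- first and raises KeyError there itself.
def Pre_similarity_calculate (given_user : String) (user_rating_dict : List (String × List Int)) : Prop :=
  (user_rating_dict.map Prod.fst).Nodup ∧ given_user ∈ user_rating_dict.map Prod.fst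

instance (given_user : String) (user_rating_dict : List (String × List Int)) : Decidable (Pre_similarity_calculate given_user user_rating_dict) := by unfold Pre_similarity_calculate; infer_instance

def pvWitness_similarity_calculate : String × (List (String × List Int)) :=
  ("a", [("a", [1, 2]), ("b", [3, 4]), ("c", [0, 1])])

def Spec_similarity_calculate (given_user : String) (user_rating_dict : List (String × List Int)) (out : List (String × List Int)) : Prop := out = similarity_calculate_alt given_user user_rating_dict
instance (given_user : String) (user_rating_dict : List (String × List Int)) (out : List (String × List Int)) : Decidable (Spec_similarity_calculate given_user user_rating_dict out) := by unfold Spec_similarity_calculate; infer_instance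

-- ===== CLAIM (what is proved, stated in full; the proofs are below) =====
def Claim_equal_similarity_calculate : Prop := ∀ (given_user : String) (user_rating_dict : List (String × List Int)), Dom_similarity_calculate given_user user_rating_dict → Pre_similarity_calculate given_user user_rating_dict → Spec_similarity_calculate given_user user_rating_dict (similarity_calculate given_user user_rating_dict)

-- ===== LEMMAS AND PROOFS =====

-- the second loop of A: overwriting every key of an already-built dict in place
theorem items_foldl_insert_overwrite {ν : Type} (f g : String → ν) :
    ∀ (ks : List String) (pre : List (String × ν)),
      (pre.map Prod.fst ++ ks).Nodup →
      ((ks.foldl (fun c u => c.insert u (f u))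
          (PySem.Dict.mk (pre ++ ks.map (fun u => (u, g u))))).items : List (String × ν))
        = pre ++ ks.map (fun u => (u, f u)) := by
  intro ks
  induction ks with
  | nil => intro pre _; simp
  | cons k kt ih =>
    intro pre hnd
    have hkpre : k ∉ pre.map Prod.fst := by
      intro hk
      exact (List.disjoint_of_nodup_append hnd) hk (by simp)
    have hkkt : k ∉ kt := by
      have := (List.nodup_append.mp hnd).2.1
      simp at this; exact this.1
    have hcont : (PySem.Dict.mk (pre ++ (k :: kt).map (fun u => (u, g u)))).contains k = true := by
      rw [PySem.Dict.contains_iff_mem_keys]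
      simp [PySem.Dict.keys]
    have hitems : ((PySem.Dict.mk (pre ++ (k :: kt).map (fun u => (u, g u)))).insert k (f k)).items
        = (pre ++ [(k, f k)]) ++ kt.map (fun u => (u, g u)) := by
      rw [PySem.Dict.items_insert_of_contains _ _ hcont]
      simp only [List.map_cons, List.map_append]
      rw [List.map_congr_left (g := id), List.map_congr_left (l := kt.map fun u => (u, g u)) (g := id)]
      · simp
      · intro p hp
        obtain ⟨u, hu, rfl⟩ := List.mem_map.mp hp
        have : u ≠ k := fun h => hkkt (h ▸ hu)
        simp [this]
      · intro p hp
        have : p.1 ≠ k := fun h => hkpre (h ▸ (List.mem_map_of_mem hp))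
        simp [beq_iff_eq, this]
    have hdict : ((PySem.Dict.mk (pre ++ (k :: kt).map (fun u => (u, g u)))).insert k (f k))
        = PySem.Dict.mk ((pre ++ [(k, f k)]) ++ kt.map (fun u => (u, g u))) :=
      PySem.Dict.ext hitems
    simp only [List.foldl_cons, hdict]
    have hnd' : ((pre ++ [(k, f k)]).map Prod.fst ++ kt).Nodup := by
      simp only [List.map_append, List.map_cons, List.map_nil, List.append_assoc,
        List.cons_append, List.nil_append] at hnd ⊢
      exact hnd
    have := ih (pre ++ [(k, f k)]) hnd'
    simpa [List.append_assoc] using this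

-- range-indexed product sum = zip product sum
theorem sum_range_eq_zip : ∀ (K L : List Int), K.length = L.length →
    ((List.range K.length).map (fun j => K.getD j 0 * L.getD j 0)).sum = pyDotZip K L := by
  intro K
  induction K with
  | nil => intro L h; simp [pyDotZip]
  | cons x xt ih =>
    intro L h
    cases L with
    | nil => simp at h
    | cons y yt =>
      simp only [List.length_cons] at h
      simp only [List.length_cons, List.range_succ_eq_map, List.map_cons, List.map_map,
        List.sum_cons, pyDotZip, List.zip_cons_cons]
      have : ((List.range xt.length).map ((fun j => (x :: xt).getD j 0 * (y :: yt).getD j 0) ∘ Nat.succ))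
          = (List.range xt.length).map (fun j => xt.getD j 0 * yt.getD j 0) := by
        apply List.map_congr_left; intro j _; simp
      rw [this]
      have h3 := ih yt (by omega)
      simp only [pyDotZip] at h3
      simpa [List.getD] using h3

-- dotproduct = guarded zip-sum
theorem dot_eq (K L : List Int) :
    dotproduct K L = if L.length = K.length ∧ K ≠ [] then pyDotZip K L else 0 := by
  unfold dotproduct
  by_cases h1 : K.length = L.length ∧ K.length ≠ 0
  · have h2 : L.length = K.length ∧ K ≠ [] := by
      obtain ⟨ha, hb⟩ := h1
      exact ⟨ha.symm, by intro h; subst h; simp at hb⟩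
    rw [if_pos h1, if_pos h2]
    rw [PySem.List.pyRange_zero_natCast, List.map_map]
    have hm : List.map ((fun n => PySem.List.pyGetD K n 0 * PySem.List.pyGetD L n 0) ∘ fun k : Nat => (k : Int)) (List.range K.length)
        = List.map (fun j => K.getD j 0 * L.getD j 0) (List.range K.length) := by
      apply List.map_congr_left; intro j _; simp [pysem]
    rw [hm]
    exact sum_range_eq_zip K L h1.1
  · have h2 : ¬ (L.length = K.length ∧ K ≠ []) := by
      intro ⟨ha, hb⟩
      exact h1 ⟨ha.symm, by simpa using (List.length_pos_iff.mpr hb).ne'⟩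
    rw [if_neg h1, if_neg h2]

-- Python list.insert at a Nat position i ≤ len
theorem pyInsert_natCast {α : Type} (xs : List α) (i : Nat) (x : α) (h : i ≤ xs.length) :
    PySem.List.insert xs (i : Int) x = xs.take i ++ x :: xs.drop i := by
  simp only [PySem.List.insert, PySem.List.sliceIndices]
  have h0 : ¬ ((1:Int) < 0) := by omega
  have h1 : ¬ ((i:Int) < 0) := by omega
  simp only [if_neg h0, if_neg h1]
  have : min (i : Int) (xs.length : Int) = (i : Int) := by omega
  rw [this]
  simp

theorem bFindIdx_le_length (sc : Int) (s : List (String × Int)) : bFindIdx sc s ≤ s.length := by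
  induction s with
  | nil => simp [bFindIdx]
  | cons y ys ih =>
    by_cases h : y.2 ≥ sc
    · simp [bFindIdx, h]; omega
    · simp [bFindIdx, h]

theorem bFindIdx_take (sc : Int) : ∀ (s : List (String × Int)) (k : Nat),
    bFindIdx sc (s.take k) = min (bFindIdx sc s) k := by
  intro s
  induction s with
  | nil => intro k; simp [bFindIdx]
  | cons y ys ih =>
    intro k
    cases k with
    | zero => simp [bFindIdx]
    | succ k' =>
      by_cases h : y.2 ≥ sc
      · simp [List.take_succ_cons, bFindIdx, h, ih k']
      · simp [bFindIdx, h]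

-- stable descending insertion position = bFindIdx
theorem insertBy_eq (x : String × Int) (s : List (String × Int)) :
    PySem.List.insertBy (fun a b => decide (b.2 < a.2)) x s
      = s.take (bFindIdx x.2 s) ++ x :: s.drop (bFindIdx x.2 s) := by
  induction s with
  | nil => simp [PySem.List.insertBy, bFindIdx]
  | cons y ys ih =>
    by_cases h : y.2 < x.2
    · have h' : ¬ (y.2 ≥ x.2) := by omega
      simp [PySem.List.insertBy, bFindIdx, h, h']
    · have h' : y.2 ≥ x.2 := by omega
      simp [PySem.List.insertBy, bFindIdx, h, h', ih]

theorem take_insert_comm {α : Type} (x : α) : ∀ (s : List α) (i k : Nat), i < k →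
    ((s.take k).take i ++ x :: (s.take k).drop i).take k = (s.take i ++ x :: s.drop i).take k := by
  intro s i
  induction i generalizing s with
  | zero =>
    intro k hk
    obtain ⟨k', rfl⟩ : ∃ k', k = k' + 1 := ⟨k - 1, by omega⟩
    simp [List.take_take]
  | succ i' ih =>
    intro k hk
    obtain ⟨k', rfl⟩ : ∃ k', k = k' + 1 := ⟨k - 1, by omega⟩
    cases s with
    | nil => simp
    | cons y ys =>
      simp only [List.take_succ_cons, List.drop_succ_cons, List.cons_append]
      rw [ih ys k' (by omega)]

-- one bounded-insert step = take k of one insertBy step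
theorem bstep_take (k : Nat) (x : String × Int) (s : List (String × Int)) :
    (if bFindIdx x.2 (s.take k) < k
       then (PySem.List.insert (s.take k) ((bFindIdx x.2 (s.take k) : Nat) : Int) x).take k
       else s.take k)
      = (PySem.List.insertBy (fun a b => decide (b.2 < a.2)) x s).take k := by
  rw [bFindIdx_take, insertBy_eq]
  have hle := bFindIdx_le_length x.2 s
  by_cases hi : bFindIdx x.2 s < k
  · have hmin : min (bFindIdx x.2 s) k = bFindIdx x.2 s := by omega
    rw [hmin, if_pos hi]
    rw [pyInsert_natCast _ _ _ (by simp; omega)]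
    exact take_insert_comm x s (bFindIdx x.2 s) k hi
  · have hmin : min (bFindIdx x.2 s) k = k := by omega
    rw [hmin, if_neg (lt_irrefl k)]
    rw [List.take_append_of_le_length (by simp; omega), List.take_take,
      Nat.min_eq_left (by omega)]

theorem topk_fold (k : Nat) (score : String × List Int → Int) :
    ∀ (xs : List (String × List Int)) (s : List (String × Int)),
      xs.foldl (fun top p =>
          let sc := score p
          let i := bFindIdx sc top
          if i < k then (PySem.List.insert top (i : Int) (p.1, sc)).take k else top) (s.take k)
        = (xs.foldl (fun acc p =>
            PySem.List.insertBy (fun a b => decide (b.2 < a.2)) (p.1, score p) acc) s).take k := by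
  intro xs
  induction xs with
  | nil => intro s; simp
  | cons p pt ih =>
    intro s
    simp only [List.foldl_cons]
    rw [show (let sc := score p;
        let i := bFindIdx sc (s.take k);
        if i < k then (PySem.List.insert (s.take k) (i : Int) (p.1, sc)).take k else s.take k)
      = (PySem.List.insertBy (fun a b => decide (b.2 < a.2)) (p.1, score p) s).take k from
        bstep_take k (p.1, score p) s]
    exact ih (PySem.List.insertBy (fun a b => decide (b.2 < a.2)) (p.1, score p) s)

-- ===== VERDICT (by name: the statement is the Claim_ definition above) =====
theorem similarity_calculate_spec : Claim_equal_similarity_calculate := by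
  intro gu urd _ hpre
  obtain ⟨hnd, hmem⟩ := hpre
  unfold Spec_similarity_calculate similarity_calculate similarity_calculate_alt
  simp only
  have hnk : (PySem.Dict.mk urd : PySem.Dict String (List Int)).keys.Nodup := by
    simpa [PySem.Dict.keys] using hnd
  -- abbreviations matching the goal's subterms
  set d : PySem.Dict String (List Int) := PySem.Dict.mk urd with hd
  set f : String → Int := fun u => dotproduct (d.getD gu []) (d.getD u []) with hf
  set sB : String × List Int → Int := fun p =>
    if p.2.length = (d.getD gu []).length ∧ d.getD gu [] ≠ [] then pyDotZip (d.getD gu []) p.2 else 0 with hsB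
  set k : Nat := min d.size 4 with hk
  -- A's dict-building loops produce the scored association list
  have h0 : (d.keys.foldl (fun c u => c.insert u (0:Int)) PySem.Dict.empty)
      = PySem.Dict.mk ([] ++ d.keys.map (fun u => (u, (0:Int)))) := by
    apply PySem.Dict.ext
    rw [PySem.Dict.items_foldl_insert_fresh d.keys (fun u => u) (fun _ => (0:Int)) PySem.Dict.empty
      (by intro a _; simp [pysem]) (by simpa using hnk)]
    simp [pysem, PySem.Dict.empty]
  have h1 : (d.keys.foldl (fun c u => c.insert u (f u))
        (d.keys.foldl (fun c u => c.insert u (0:Int)) PySem.Dict.empty)).items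
      = d.keys.map (fun u => (u, f u)) := by
    rw [h0]
    have := items_foldl_insert_overwrite f (fun _ => (0:Int)) d.keys []
      (by simpa using hnk)
    simpa using this
  have h2 : d.keys.map (fun u => (u, f u)) = urd.map (fun p => (p.1, sB p)) := by
    have : d.keys = urd.map Prod.fst := by simp [PySem.Dict.keys, hd]
    rw [this, List.map_map]
    apply List.map_congr_left
    intro p hp
    have hget : d.getD p.1 [] = p.2 :=
      PySem.Dict.getD_of_mem_items d (by simpa [hd] using hp) hnk []
    simp only [Function.comp_apply, hf, hsB, hget, dot_eq]
  -- the slice bound is min(len, 4)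
  have hsl : (if ((d.size : Int) > 4) then (4:Int) else (d.size : Int)).toNat = k := by
    split_ifs with h <;> omega
  have hge : (0:Int) ≤ (if ((d.size : Int) > 4) then (4:Int) else (d.size : Int)) := by
    split_ifs <;> omega
  -- B's bounded-insertion pass = take k of the stable descending insertion sort
  have hB : (urd.foldl (fun top p =>
        if bFindIdx (sB p) top < k
          then (PySem.List.insert top ((bFindIdx (sB p) top : Nat) : Int) (p.1, sB p)).take k
          else top) ([] : List (String × Int)))
      = (urd.foldl (fun acc p =>
          PySem.List.insertBy (fun a b => decide (b.2 < a.2)) (p.1, sB p) acc) []).take k := by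
    have := topk_fold k sB urd []
    simpa using this
  have hS : PySem.List.sorted (urd.map (fun p => (p.1, sB p))) (fun p => p.2) true
      = urd.foldl (fun acc p =>
          PySem.List.insertBy (fun a b => decide (b.2 < a.2)) (p.1, sB p) acc) [] := by
    rw [PySem.List.sorted_rev_eq_foldl_insertBy, List.foldl_map]
  rw [h1, h2, PySem.List.slice_to _ hge, hsl, hS, ← hB]
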